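-- pv_equiv track=rewrite | github.com/DanielShumeyko/Uni | Lang/Lab1/lab1.py | dist
-- ===== SOURCE A (Python) =====
-- def dist(a,b):
--     distance = 0
--     word1 = a
--     word2 = b
--     len1 = len(word1)
--     len2 = len(word2)
--     if len1 > len2:
--         distance += len1 - len2
--         word1 = word1[:len2]
--     elif len1 < len2:
--         distance += len2 - len1
--         word2 = word2[:len1]
--
--     for i in range(len(word1)):
--         if word1[i] != word2[i]:
--             distance += 1
--     return distance
-- ===== SOURCE B (Python) =====
-- def dist(a, b):
--     common = set(enumerate(a)) & set(enumerate(b))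
--     return max(len(a), len(b)) - len(common)
-- ===== Notes on version B (the rewrite author's own statement) =====
-- stated objective: alternative
-- what changed: B builds the sets of (position, character) pairs of each string and intersects them: a pair survives exactly when both strings carry that character at that position, so the distance is max(len(a),len(b)) minus the intersection size; no length branches, no truncation, no index loop.
import Mathlib
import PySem

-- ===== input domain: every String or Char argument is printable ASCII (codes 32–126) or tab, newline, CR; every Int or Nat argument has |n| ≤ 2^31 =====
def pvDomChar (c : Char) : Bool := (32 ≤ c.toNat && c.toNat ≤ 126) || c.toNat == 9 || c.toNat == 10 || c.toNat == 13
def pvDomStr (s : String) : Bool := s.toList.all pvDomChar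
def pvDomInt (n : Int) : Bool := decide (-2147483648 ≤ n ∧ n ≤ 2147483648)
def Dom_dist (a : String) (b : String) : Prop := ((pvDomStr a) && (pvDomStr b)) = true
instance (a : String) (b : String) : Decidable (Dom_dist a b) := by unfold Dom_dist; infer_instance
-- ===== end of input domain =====

-- B intersects the sets of (position, character) pairs of the two strings and returns
-- max(len(a), len(b)) minus the intersection size; no length branches, no truncation,
-- no index loop. Both programs are total; A = B everywhere.

-- ===== PORT A =====
-- A: accumulate the length difference, truncate the longer word, then loop over indices
-- counting mismatching positions.
def dist (a : String) (b : String) : Int :=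
  let distance : Int := 0
  let word1 := a.toList
  let word2 := b.toList
  let len1 := word1.length
  let len2 := word2.length
  let st :=
    if len1 > len2 then (distance + ((len1 : Int) - (len2 : Int)), word1.take len2, word2)
    else if len1 < len2 then (distance + ((len2 : Int) - (len1 : Int)), word1, word2.take len1)
    else (distance, word1, word2)
  -- for i in range(len(word1)): if word1[i] != word2[i]: distance += 1
  -- indices are in range, so pyGetD's default is never used (exact)
  (PySem.List.pyRange 0 (st.2.1.length : Int)).foldl
    (fun d i => if PySem.List.pyGetD st.2.1 i ' ' ≠ PySem.List.pyGetD st.2.2 i ' ' then d + 1 else d)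
    st.1

-- ===== PORT B =====
-- common = set(enumerate(a)) & set(enumerate(b)); return max(len(a), len(b)) - len(common)
-- (only the SIZE of the intersection is used, so Python's set iteration order is irrelevant)
def dist_alt (a : String) (b : String) : Int :=
  let common : PySem.Set (Int × Char) :=
    PySem.Set.inter (PySem.Set.ofList (PySem.List.enumerate a.toList))
                    (PySem.Set.ofList (PySem.List.enumerate b.toList))
  (max a.toList.length b.toList.length : Int) - PySem.Set.len common

-- ===== PRECONDITION & SPEC =====
def Spec_dist (a : String) (b : String) (out : Int) : Prop := out = dist_alt a b
instance (a : String) (b : String) (out : Int) : Decidable (Spec_dist a b out) := by unfold Spec_dist; infer_instance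

-- ===== CLAIM (what is proved, stated in full; the proofs are below) =====
def Claim_equal_dist : Prop := ∀ (a : String) (b : String), Dom_dist a b → Spec_dist a b (dist a b)

-- ===== LEMMAS AND PROOFS =====

-- enumerate produces strictly increasing (hence distinct) indices
theorem nodup_enumerate {α : Type} (xs : List α) (s : Int) :
    (PySem.List.enumerate xs s).Nodup := by
  exact (PySem.List.pairwise_lt_enumerate xs s).imp (fun h => by
    intro he; rw [he] at h; exact lt_irrefl _ h)

theorem fst_mem_enumerate_ge {α : Type} (xs : List α) (s : Int) (p : Int × α)
    (h : p ∈ PySem.List.enumerate xs s) : s ≤ p.1 := by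
  rw [PySem.List.mem_enumerate_iff] at h
  obtain ⟨k, hk, rfl⟩ := h
  show s ≤ s + (k : Int)
  omega

-- the intersection of the two enumerations counts the positions where the characters agree
theorem filter_enum (x y : List Char) (s : Int) :
    ((PySem.List.enumerate x s).filter
        (fun p => (PySem.List.enumerate y s).contains p)).length
      = (x.zip y).countP (fun p => p.1 == p.2) := by
  induction x generalizing y s with
  | nil => simp [PySem.List.enumerate_nil]
  | cons a x ih =>
    cases y with
    | nil => simp [PySem.List.enumerate_nil]
    | cons b y =>
      rw [PySem.List.enumerate_cons, PySem.List.enumerate_cons]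
      have htail : (PySem.List.enumerate x (s + 1)).filter
            (fun p => ((s, b) :: PySem.List.enumerate y (s + 1)).contains p)
          = (PySem.List.enumerate x (s + 1)).filter
            (fun p => (PySem.List.enumerate y (s + 1)).contains p) := by
        apply List.filter_congr
        intro p hp
        have hge := fst_mem_enumerate_ge x (s + 1) p hp
        have hne : ¬ (p = (s, b)) := by
          intro he
          have hfst : ((s, b) : Int × Char).1 = s := rfl
          rw [he, hfst] at hge; omega
        simp [hne]
      have hhead : ((s, b) :: PySem.List.enumerate y (s + 1)).contains (s, a)
          = (a == b) := by
        have : ¬ ((s, a) ∈ PySem.List.enumerate y (s + 1)) := by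
          intro hm
          have hge := fst_mem_enumerate_ge y (s + 1) _ hm
          have hfst : ((s, a) : Int × Char).1 = s := rfl
          rw [hfst] at hge; omega
        by_cases hab : a = b <;>
          simp [hab, this, Prod.ext_iff]
      rw [List.filter_cons, htail, hhead, List.zip_cons_cons, List.countP_cons]
      by_cases hab : a = b
      · rw [if_pos (by simp [hab]), List.length_cons, ih y (s + 1)]
        simp [hab]
      · rw [if_neg (by simp [hab]), ih y (s + 1)]
        simp [hab]

-- mismatches + matches = length of the zip
theorem countP_ne_add_countP_eq (z : List (Char × Char)) :
    z.countP (fun p => p.1 != p.2) + z.countP (fun p => p.1 == p.2) = z.length := by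
  induction z with
  | nil => rfl
  | cons p z ih =>
    by_cases h : p.1 = p.2 <;> simp [h, ← ih] <;> omega

-- zip already truncates to the shorter list
theorem zip_take_right_length {α β : Type} (x : List α) (y : List β) :
    x.zip (y.take x.length) = x.zip y := by
  induction x generalizing y with
  | nil => simp
  | cons a x ih =>
    cases y with
    | nil => simp
    | cons b y => simp [List.zip_cons_cons, ih]

theorem zip_take_left_length {α β : Type} (x : List α) (y : List β) :
    (x.take y.length).zip y = x.zip y := by
  induction y generalizing x with
  | nil => simp
  | cons b y ih =>
    cases x with
    | nil => simp
    | cons a x => simp [List.zip_cons_cons, ih]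

-- pyGetD distributes over zip at an in-range index
theorem pyGetD_zip (x y : List Char) (i : Int) (h0 : 0 ≤ i)
    (h1 : i < ((x.zip y).length : Int)) :
    PySem.List.pyGetD (x.zip y) i (' ', ' ') =
      (PySem.List.pyGetD x i ' ', PySem.List.pyGetD y i ' ') := by
  have hx : i < (x.length : Int) := by
    have := List.length_zip (l₁ := x) (l₂ := y); omega
  have hy : i < (y.length : Int) := by
    have := List.length_zip (l₁ := x) (l₂ := y); omega
  rw [PySem.List.pyGetD_eq_getElem _ _ h0 h1, PySem.List.pyGetD_eq_getElem _ _ h0 hx,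
      PySem.List.pyGetD_eq_getElem _ _ h0 hy, List.getElem_zip]

-- A's index loop over two equal-length lists counts the mismatching pairs of their zip
theorem fold_mismatch (x y : List Char) (h : x.length = y.length) (d : Int) :
    (PySem.List.pyRange 0 (x.length : Int)).foldl
      (fun acc i => if PySem.List.pyGetD x i ' ' ≠ PySem.List.pyGetD y i ' ' then acc + 1 else acc) d
    = d + ((x.zip y).countP (fun p => p.1 != p.2) : Int) := by
  have hz : (x.zip y).length = x.length := by
    rw [List.length_zip, h, Nat.min_self]
  rw [show (x.length : Int) = ((x.zip y).length : Int) by rw [hz]]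
  rw [PySem.List.foldl_congr_mem _ _
      (fun acc i => if (PySem.List.pyGetD (x.zip y) i (' ', ' ')).1 ≠ (PySem.List.pyGetD (x.zip y) i (' ', ' ')).2 then acc + 1 else acc) d
      (by
        intro acc i hi
        rw [PySem.List.mem_pyRange_one] at hi
        have hg := pyGetD_zip x y i hi.1 hi.2
        simp only [hg])]
  rw [PySem.List.foldl_pyRange_zero_pyGetD' (x.zip y) (' ', ' ')
      (fun acc p => if p.1 ≠ p.2 then acc + 1 else acc) d]
  have hfun : (fun (acc : Int) (p : Char × Char) => if p.1 ≠ p.2 then acc + 1 else acc)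
      = (fun acc p => if (p.1 != p.2) = true then acc + 1 else acc) := by
    funext acc p; simp [bne_iff_ne]
  rw [hfun, PySem.List.foldl_count_if]

-- B's intersection size is the number of matching positions of the zip
theorem len_inter_enum (x y : List Char) :
    PySem.Set.len (PySem.Set.inter (PySem.Set.ofList (PySem.List.enumerate x 0))
        (PySem.Set.ofList (PySem.List.enumerate y 0)))
      = ((x.zip y).countP (fun p => p.1 == p.2) : Int) := by
  have h1 := PySem.Set.ofList_eq_self_of_nodup (PySem.List.enumerate x 0) (nodup_enumerate x 0)
  have h2 := PySem.Set.ofList_eq_self_of_nodup (PySem.List.enumerate y 0) (nodup_enumerate y 0)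
  rw [h1, h2]
  have h3 : PySem.Set.inter (PySem.List.enumerate x 0) (PySem.List.enumerate y 0)
      = (PySem.List.enumerate x 0).filter (fun p => (PySem.List.enumerate y 0).contains p) := by
    simp [PySem.Set.inter]
  rw [h3]
  show (((PySem.List.enumerate x 0).filter
      (fun p => (PySem.List.enumerate y 0).contains p)).length : Int) = _
  rw [filter_enum x y 0]

-- ===== VERDICT (by name: the statement is the Claim_ definition above) =====
theorem dist_spec : Claim_equal_dist := by
  intro a b _
  unfold Spec_dist _root_.dist dist_alt
  simp only []
  set x := a.toList with hx
  set y := b.toList with hy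
  rw [len_inter_enum x y]
  have hcount := countP_ne_add_countP_eq (x.zip y)
  have hzlen : (x.zip y).length = min x.length y.length := List.length_zip
  by_cases h1 : x.length > y.length
  · simp only [if_pos h1]
    have hlen : (x.take y.length).length = y.length := by
      rw [List.length_take]; omega
    rw [fold_mismatch _ _ (by rw [hlen]) _]
    rw [zip_take_left_length x y]
    omega
  · simp only [if_neg h1]
    by_cases h2 : x.length < y.length
    · simp only [if_pos h2]
      have hlen : (y.take x.length).length = x.length := by
        rw [List.length_take]; omega
      rw [fold_mismatch _ _ (by rw [hlen]) _]
      rw [zip_take_right_length x y]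
      omega
    · simp only [if_neg h2]
      rw [fold_mismatch _ _ (by omega) _]
      omega
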